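-- pv_equiv track=rewrite | github.com/peterb91/fibonacci_primes | fibonacci_prime_numbers.py | prime_fibonacci_numbers
-- ===== SOURCE A (Python) =====
-- def fib(n):
--     """ Return (n+1)th element of fibonacci sequence"""
--
--     if not isinstance(n, int) or n < 0:
--         return "Input must be not negative integer"
--     elif n < 2:
--         return n
--     elif n > 1:
--         return fib(n-2) + fib(n-1)
--
-- def is_prime_number(num):
--     """Return True if num is prime and False if num is not prime or input non integer"""
--
--     if not isinstance(num, int) or num < 2:
--         return False
--     for i in range(2, num):
--         if num % i == 0:
--             return False
--     return True
--
-- def prime_fibonacci_numbers(i):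
--     """Return i-element list of primes from fibonacci sequence starting from the beginning of the sequence"""
--     result = []
--     if not isinstance(i, int) or i < 0:
--         return "Input must be not negative integer"
--     if i == 0:
--         return result
--     for fib_num in [fib(n) for n in range(20)]:
--         if is_prime_number(fib_num):
--             result.append(fib_num)
--         if len(result) == i:
--             break
--     return result
-- ===== SOURCE B (Python) =====
-- def _is_prime(n):
--     if n < 2:
--         return False
--     d = 2
--     while d * d <= n:
--         if n % d == 0:
--             return False
--         d += 1
--     return True
--
--
-- def prime_fibonacci_numbers(i):
--     """Return i-element list of primes from fibonacci sequence starting from the beginning of the sequence"""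
--     if not isinstance(i, int) or i < 0:
--         return "Input must be not negative integer"
--     result = []
--     prev, cur = 0, 1
--     for _ in range(20):
--         if len(result) == i:
--             break
--         if _is_prime(prev):
--             result.append(prev)
--         prev, cur = cur, prev + cur
--     return result
-- ===== Notes on version B (the rewrite author's own statement) =====
-- stated objective: simpler
-- what changed: Replaces the list comprehension over the exponential recursive fib helper and the trial-division-to-n primality test with a single iterative pass that generates Fibonacci terms with a (prev, cur) pair and tests primality by trial division bounded by the square root.
import Mathlib
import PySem

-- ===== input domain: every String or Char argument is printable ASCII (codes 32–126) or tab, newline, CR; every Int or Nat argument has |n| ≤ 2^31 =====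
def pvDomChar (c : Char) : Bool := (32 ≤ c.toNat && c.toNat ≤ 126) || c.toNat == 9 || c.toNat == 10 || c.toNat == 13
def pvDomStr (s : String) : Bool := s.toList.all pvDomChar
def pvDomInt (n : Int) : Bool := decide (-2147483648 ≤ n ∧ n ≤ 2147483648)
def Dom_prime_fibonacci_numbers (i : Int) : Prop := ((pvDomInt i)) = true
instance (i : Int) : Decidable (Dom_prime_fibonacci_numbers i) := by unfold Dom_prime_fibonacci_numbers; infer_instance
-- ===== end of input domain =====

-- B replaces A's comprehension over the exponential recursive fib (and trial division up to n)
-- with one iterative pass keeping a (prev, cur) pair and sqrt-bounded trial division: simpler and cheaper.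
-- Pre_ excludes i < 0, where the Python returns an error STRING instead of a list.


-- ===== PORT A =====
-- fib: A returns an error string for negative n, but prime_fibonacci_numbers only calls it on
-- n ∈ range(20), so the port covers the integer branches (exact for 0 ≤ n).
-- fuel = n.toNat + 1 bounds the recursion depth; it only makes the recursion structural.
def fibAgo (fuel : Nat) (n : Int) : Int :=
  match fuel with
  | 0 => 0            -- unreachable: fuel exceeds the recursion depth
  | f + 1 => if n < 2 then n else fibAgo f (n - 2) + fibAgo f (n - 1)

def fibA (n : Int) : Int := fibAgo (n.toNat + 1) n

-- is_prime_number: the for-loop with early `return False` is the conjunction over range(2, num).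
def is_prime_numberA (num : Int) : Bool :=
  if num < 2 then false
  else (PySem.List.pyRange 2 num 1).all (fun d => !(PySem.Int.mod num d == 0))

-- the for-loop of A: append if prime, then break when len(result) == i
def loopA (i : Int) (fibs : List Int) (result : List Int) : List Int :=
  match fibs with
  | [] => result
  | f :: rest =>
    let result' := if is_prime_numberA f then result ++ [f] else result
    if (result'.length : Int) = i then result' else loopA i rest result'

def prime_fibonacci_numbers (i : Int) : List Int :=
  if i < 0 then []        -- Python returns the error string here; excluded by Pre_
  else if i = 0 then []
  else loopA i ((PySem.List.pyRange 0 20 1).map fibA) []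

-- ===== PORT B =====
-- fuel = n.toNat bounds the number of while-iterations; it only makes the loop structural.
def isPrimeGoB (fuel : Nat) (n d : Int) : Bool :=
  match fuel with
  | 0 => true         -- unreachable: the loop runs at most sqrt n ≤ fuel times
  | f + 1 =>
    if d * d ≤ n then
      if PySem.Int.mod n d == 0 then false else isPrimeGoB f n (d + 1)
    else true

def isPrimeB (n : Int) : Bool :=
  if n < 2 then false else isPrimeGoB n.toNat n 2

-- the for-loop of B: 20 iterations, break first, emit prev, advance the pair
def loopB (i : Int) (k : Nat) (prev cur : Int) (result : List Int) : List Int :=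
  match k with
  | 0 => result
  | k + 1 =>
    if (result.length : Int) = i then result
    else
      let result' := if isPrimeB prev then result ++ [prev] else result
      loopB i k cur (prev + cur) result'

def prime_fibonacci_numbers_alt (i : Int) : List Int :=
  if i < 0 then []        -- Python B returns the error string here; excluded by Pre_
  else loopB i 20 0 1 []

-- ===== PRECONDITION & SPEC =====
-- Pre_ excludes exactly i < 0, where Python A returns a string, not a list of ints.
def Pre_prime_fibonacci_numbers (i : Int) : Prop := 0 ≤ i
instance (i : Int) : Decidable (Pre_prime_fibonacci_numbers i) := by unfold Pre_prime_fibonacci_numbers; infer_instance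
def pvWitness_prime_fibonacci_numbers : Int := 3

def Spec_prime_fibonacci_numbers (i : Int) (out : List Int) : Prop := out = prime_fibonacci_numbers_alt i
instance (i : Int) (out : List Int) : Decidable (Spec_prime_fibonacci_numbers i out) := by unfold Spec_prime_fibonacci_numbers; infer_instance

-- ===== CLAIM (what is proved, stated in full; the proofs are below) =====
def Claim_equal_prime_fibonacci_numbers : Prop := ∀ (i : Int), Dom_prime_fibonacci_numbers i → Pre_prime_fibonacci_numbers i → Spec_prime_fibonacci_numbers i (prime_fibonacci_numbers i)

-- ===== LEMMAS AND PROOFS =====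

-- B's loop, re-expressed over the explicit list of terms it emits
def genFib (k : Nat) (prev cur : Int) : List Int :=
  match k with
  | 0 => []
  | k + 1 => prev :: genFib k cur (prev + cur)

def loopBL (i : Int) (fibs : List Int) (result : List Int) : List Int :=
  match fibs with
  | [] => result
  | f :: rest =>
    if (result.length : Int) = i then result
    else loopBL i rest (if isPrimeB f then result ++ [f] else result)

lemma loopB_eq_loopBL (k : Nat) : ∀ (i prev cur : Int) (res : List Int),
    loopB i k prev cur res = loopBL i (genFib k prev cur) res := by
  induction k with
  | zero => intro i prev cur res; rfl
  | succ k ih =>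
    intro i prev cur res
    simp only [loopB, genFib, loopBL]
    split
    · rfl
    · exact ih i cur (prev + cur) _

lemma loopBL_of_len_eq (i : Int) (fibs res : List Int) (h : (res.length : Int) = i) :
    loopBL i fibs res = res := by
  cases fibs with
  | nil => rfl
  | cons f rest => simp [loopBL, h]

lemma loopA_eq_loopBL (i : Int) (fibs : List Int)
    (hp : ∀ f ∈ fibs, is_prime_numberA f = isPrimeB f) :
    ∀ res : List Int, (res.length : Int) ≠ i → loopA i fibs res = loopBL i fibs res := by
  induction fibs with
  | nil => intro res _; rfl
  | cons f rest ih =>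
    intro res hne
    have hpf : is_prime_numberA f = isPrimeB f := hp f (List.mem_cons_self ..)
    have hrest : ∀ g ∈ rest, is_prime_numberA g = isPrimeB g :=
      fun g hg => hp g (List.mem_cons_of_mem _ hg)
    simp only [loopA, loopBL, if_neg hne, hpf]
    by_cases hlen : ((if isPrimeB f then res ++ [f] else res).length : Int) = i
    · rw [if_pos hlen, loopBL_of_len_eq i rest _ hlen]
    · rw [if_neg hlen, ih hrest _ hlen]

lemma fibs_eval : (PySem.List.pyRange 0 20 1).map fibA =
    [0, 1, 1, 2, 3, 5, 8, 13, 21, 34, 55, 89, 144, 233, 377, 610, 987, 1597, 2584, 4181] := by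
  decide

lemma genFib_eval : genFib 20 0 1 =
    [0, 1, 1, 2, 3, 5, 8, 13, 21, 34, 55, 89, 144, 233, 377, 610, 987, 1597, 2584, 4181] := by
  decide

set_option maxRecDepth 8192 in
lemma primes_agree : ∀ f ∈ [(0 : Int), 1, 1, 2, 3, 5, 8, 13, 21, 34, 55, 89, 144, 233, 377, 610, 987, 1597, 2584, 4181],
    is_prime_numberA f = isPrimeB f := by
  decide

-- ===== VERDICT (by name: the statement is the Claim_ definition above) =====
theorem prime_fibonacci_numbers_spec : Claim_equal_prime_fibonacci_numbers := by
  intro i _ hpre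
  unfold Spec_prime_fibonacci_numbers prime_fibonacci_numbers prime_fibonacci_numbers_alt
  have hnneg : ¬ i < 0 := by exact not_lt.mpr hpre
  rw [if_neg hnneg, if_neg hnneg]
  by_cases h0 : i = 0
  · subst h0; decide
  · rw [if_neg h0, loopB_eq_loopBL, genFib_eval, fibs_eval,
      loopA_eq_loopBL i _ primes_agree [] (by simpa using fun h => h0 h.symm)]
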